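-- pv_equiv track=rewrite | github.com/Stelliferrous/AoC | 2015/day5.py | badCombos
-- ===== SOURCE A (Python) =====
-- def badCombos(line):
-- 	bad = ["ab", "cd", "pq", "xy"]
-- 	curLetter = str("!")
-- 	for char in line:
-- 		if curLetter + char in bad:
-- 			return False
-- 			break
-- 		else:
-- 			curLetter = char
-- 	return True
-- ===== SOURCE B (Python) =====
-- def badCombos(line):
--     return not any(pair in line for pair in ["ab", "cd", "pq", "xy"])
-- ===== Notes on version B (the rewrite author's own statement) =====
-- stated objective: idiomatic
-- what changed: B replaces A's character-by-character scan with previous-letter state by four whole-string substring membership tests over the fixed list of forbidden pairs.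
import Mathlib
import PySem

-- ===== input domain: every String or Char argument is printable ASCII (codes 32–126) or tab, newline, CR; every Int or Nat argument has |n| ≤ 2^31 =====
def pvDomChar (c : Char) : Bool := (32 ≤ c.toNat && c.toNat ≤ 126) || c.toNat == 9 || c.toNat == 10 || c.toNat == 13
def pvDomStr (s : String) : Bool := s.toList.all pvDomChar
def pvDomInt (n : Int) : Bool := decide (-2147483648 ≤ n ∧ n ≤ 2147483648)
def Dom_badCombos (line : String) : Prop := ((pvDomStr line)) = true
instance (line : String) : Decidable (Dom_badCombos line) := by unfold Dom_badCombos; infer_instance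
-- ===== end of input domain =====

-- B checks each forbidden pair as a substring of the whole line instead of A's
-- character scan with previous-letter state; objective: idiomatic, same cost.

-- ===== PORT A =====
-- A's loop: carry the previous letter, test each adjacent pair against the bad list.
-- (Python strings "ab" … are represented at the Chars level as their character lists.)
def badCombosLoop (bad : List (List Char)) (cur : Char) : List Char → Bool
  | [] => true
  | c :: rest =>
    if bad.contains [cur, c] then false
    else badCombosLoop bad c rest

def badCombos (line : String) : Bool :=
  badCombosLoop [['a','b'], ['c','d'], ['p','q'], ['x','y']] '!' line.toList

-- ===== PORT B =====
def badCombos_alt (line : String) : Bool :=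
  !((["ab", "cd", "pq", "xy"] : List String).any fun p => PySem.Str.isIn p line)

-- ===== PRECONDITION & SPEC =====
def Spec_badCombos (line : String) (out : Bool) : Prop := out = badCombos_alt line
instance (line : String) (out : Bool) : Decidable (Spec_badCombos line out) := by unfold Spec_badCombos; infer_instance

-- ===== CLAIM (what is proved, stated in full; the proofs are below) =====
def Claim_equal_badCombos : Prop := ∀ (line : String), Dom_badCombos line → Spec_badCombos line (badCombos line)

-- ===== LEMMAS AND PROOFS =====

-- common form: does some adjacent pair of the list match a bad pair?
def bad2 (a b : Char) : Bool :=
  (a == 'a' && b == 'b') || (a == 'c' && b == 'd') || (a == 'p' && b == 'q') || (a == 'x' && b == 'y')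

def noPair : List Char → Bool
  | a :: b :: rest => if bad2 a b then false else noPair (b :: rest)
  | _ => true

theorem contains_eq_bad2 (x y : Char) :
    ([['a','b'], ['c','d'], ['p','q'], ['x','y']] : List (List Char)).contains [x, y] = bad2 x y := by
  simp only [bad2, List.contains_cons, List.contains_nil, List.cons_beq_cons, beq_self_eq_true,
    Bool.and_true, Bool.or_false]
  ac_rfl

theorem loopA_eq_noPair : ∀ (cs : List Char) (cur : Char),
    badCombosLoop [['a','b'], ['c','d'], ['p','q'], ['x','y']] cur cs = noPair (cur :: cs) := by
  intro cs
  induction cs with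
  | nil => intro cur; rfl
  | cons c rest ih =>
    intro cur
    simp only [badCombosLoop, noPair, contains_eq_bad2]
    cases h : bad2 cur c with
    | true => simp
    | false => simp [ih]

theorem bang_not_bad (c : Char) : bad2 '!' c = false := by
  simp [bad2]

theorem isIn_pair_nil (x y : Char) : PySem.Chars.isIn [x, y] [] = false := by
  rw [PySem.Chars.isIn_eq_false_iff]
  intro h
  have := h.length_le
  simp at this

theorem isIn_pair_singleton (x y a : Char) : PySem.Chars.isIn [x, y] [a] = false := by
  rw [PySem.Chars.isIn_eq_false_iff]
  intro h
  have := h.length_le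
  simp at this

theorem isIn_pair_cons (x y a b : Char) (rest : List Char) :
    PySem.Chars.isIn [x, y] (a :: b :: rest)
      = ((x == a && y == b) || PySem.Chars.isIn [x, y] (b :: rest)) := by
  by_cases hxy : x = a ∧ y = b
  · obtain ⟨rfl, rfl⟩ := hxy
    have : PySem.Chars.isIn [x, y] (x :: y :: rest) = true := by
      rw [PySem.Chars.isIn_iff_infix]
      exact ⟨[], rest, rfl⟩
    simp [this]
  · have hb : (x == a && y == b) = false := by
      simp only [Bool.and_eq_false_iff, beq_eq_false_iff_ne, ne_eq]
      tauto
    rw [hb, Bool.false_or]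
    by_cases h2 : PySem.Chars.isIn [x, y] (b :: rest) = true
    · rw [h2]
      rw [PySem.Chars.isIn_iff_infix] at h2 ⊢
      exact h2.trans (List.suffix_cons a _).isInfix
    · have h2f : PySem.Chars.isIn [x, y] (b :: rest) = false := by
        cases hv : PySem.Chars.isIn [x, y] (b :: rest) <;> simp_all
      rw [h2f]
      rw [PySem.Chars.isIn_eq_false_iff] at h2f ⊢
      intro hinf
      rcases (List.infix_cons_iff).1 hinf with hpre | hrest
      · rcases List.cons_prefix_cons.1 hpre with ⟨hx, hpre2⟩
        rcases List.cons_prefix_cons.1 hpre2 with ⟨hy, _⟩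
        exact hxy ⟨hx, hy⟩
      · exact h2f hrest

theorem any_isIn_eq_not_noPair : ∀ (cs : List Char),
    ([['a','b'], ['c','d'], ['p','q'], ['x','y']].any fun p => PySem.Chars.isIn p cs)
      = ! noPair cs := by
  intro cs
  match cs with
  | [] => simp [noPair, isIn_pair_nil]
  | [a] => simp [noPair, isIn_pair_singleton]
  | a :: b :: rest =>
    have ih := any_isIn_eq_not_noPair (b :: rest)
    simp only [List.any_cons, List.any_nil] at ih ⊢
    rw [isIn_pair_cons, isIn_pair_cons, isIn_pair_cons, isIn_pair_cons]
    cases h : bad2 a b with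
    | true =>
      have hn : noPair (a :: b :: rest) = false := by simp [noPair, h]
      rw [hn]
      simp only [bad2] at h
      rcases Bool.or_eq_true_iff.1 h with h' | h4
      · rcases Bool.or_eq_true_iff.1 h' with h'' | h3
        · rcases Bool.or_eq_true_iff.1 h'' with h1 | h2 <;> simp_all
        · simp_all
      · simp_all
    | false =>
      have hn : noPair (a :: b :: rest) = noPair (b :: rest) := by simp [noPair, h]
      rw [hn, ← ih]
      simp only [bad2, Bool.or_eq_false_iff] at h
      obtain ⟨⟨⟨h1, h2⟩, h3⟩, h4⟩ := h
      have e1 : (('a' : Char) == a && ('b' : Char) == b) = false := by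
        by_cases hx : a = 'a'
        · have hb : ¬ b = 'b' := by simp_all
          simp [hx, show ('b' : Char) ≠ b from fun e => hb e.symm]
        · simp [show ('a' : Char) ≠ a from fun e => hx e.symm]
      have e2 : (('c' : Char) == a && ('d' : Char) == b) = false := by
        by_cases hx : a = 'c'
        · have hb : ¬ b = 'd' := by simp_all
          simp [hx, show ('d' : Char) ≠ b from fun e => hb e.symm]
        · simp [show ('c' : Char) ≠ a from fun e => hx e.symm]
      have e3 : (('p' : Char) == a && ('q' : Char) == b) = false := by
        by_cases hx : a = 'p'
        · have hb : ¬ b = 'q' := by simp_all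
          simp [hx, show ('q' : Char) ≠ b from fun e => hb e.symm]
        · simp [show ('p' : Char) ≠ a from fun e => hx e.symm]
      have e4 : (('x' : Char) == a && ('y' : Char) == b) = false := by
        by_cases hx : a = 'x'
        · have hb : ¬ b = 'y' := by simp_all
          simp [hx, show ('y' : Char) ≠ b from fun e => hb e.symm]
        · simp [show ('x' : Char) ≠ a from fun e => hx e.symm]
      simp only [e1, e2, e3, e4, Bool.false_or, Bool.or_false]

theorem noPair_bang (cs : List Char) : noPair ('!' :: cs) = noPair cs := by
  cases cs with
  | nil => rfl
  | cons b rest => simp [noPair, bang_not_bad]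

-- ===== VERDICT (by name: the statement is the Claim_ definition above) =====
theorem badCombos_spec : Claim_equal_badCombos := by
  intro line _
  unfold Spec_badCombos badCombos badCombos_alt
  rw [loopA_eq_noPair, noPair_bang]
  have h : ∀ (p : String), PySem.Str.isIn p line = PySem.Chars.isIn p.toList line.toList := by
    intro p; rfl
  simp only [List.any_cons, List.any_nil, h]
  have := any_isIn_eq_not_noPair line.toList
  simp only [List.any_cons, List.any_nil] at this
  have hab : ("ab" : String).toList = ['a','b'] := by decide
  have hcd : ("cd" : String).toList = ['c','d'] := by decide
  have hpq : ("pq" : String).toList = ['p','q'] := by decide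
  have hxy : ("xy" : String).toList = ['x','y'] := by decide
  rw [hab, hcd, hpq, hxy, this, Bool.not_not]
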